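-- pv_equiv track=rewrite | github.com/Linkeln/mystuff | AOIS1/main.py | decimal_to_binary_reversed
-- ===== SOURCE A (Python) =====
-- def swap_zeros_ones(string):
--     swapped = ""
--     for char in string:
--         if char == '0':
--             swapped += '1'
--         elif char == '1':
--             swapped += '0'
--         else:
--             swapped += char
--
--     return swapped
--
-- def decimal_to_binary_reversed(decimal):
--     binary = ''
--     neg = True
--     if decimal >= 0:
--         neg = False
--     if decimal == 0:
--         binary = '0'
--     decimal = abs(decimal)
--     while decimal > 0:
--         binary = str(decimal % 2) + binary
--         decimal = decimal // 2
--     binary = (8 - len(binary)) * '0' + binary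
--     if neg:
--         binary = swap_zeros_ones(binary)
--         binary = '1' + binary[1:]
--     return binary
-- ===== SOURCE B (Python) =====
-- def decimal_to_binary_reversed(decimal):
--     b = format(abs(decimal), 'b').rjust(8, '0')
--     if decimal < 0:
--         b = '1' + ''.join('1' if c == '0' else '0' for c in b)[1:]
--     return b
-- ===== Notes on version B (the rewrite author's own statement) =====
-- stated objective: idiomatic
-- what changed: A's manual while/mod-div digit loop (with its special case for a zero input) is replaced by the closed-form library conversion format(abs(decimal),'b') with rjust-padding, and the negative case inverts the bits inline instead of A's character-by-character swap helper.
import Mathlib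
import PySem

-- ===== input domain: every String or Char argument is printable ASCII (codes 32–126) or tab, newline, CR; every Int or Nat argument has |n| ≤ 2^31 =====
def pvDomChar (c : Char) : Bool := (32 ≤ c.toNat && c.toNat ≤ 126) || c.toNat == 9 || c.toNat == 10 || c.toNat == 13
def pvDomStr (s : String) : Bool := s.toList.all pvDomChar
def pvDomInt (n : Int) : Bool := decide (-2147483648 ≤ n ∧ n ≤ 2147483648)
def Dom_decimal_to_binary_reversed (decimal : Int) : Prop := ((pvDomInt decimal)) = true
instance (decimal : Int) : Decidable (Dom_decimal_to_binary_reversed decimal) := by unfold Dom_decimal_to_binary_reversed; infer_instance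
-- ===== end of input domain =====

-- B replaces A's manual while/mod-div digit loop and its `decimal == 0` special case by the
-- closed-form library conversion format(abs(decimal),'b') with rjust padding (objective: idiomatic).

-- ===== PORT A =====
-- A's helper swap_zeros_ones, on the list-of-chars side (the string is built by a foldl like Python's +=)
def swap_zeros_ones (string : List Char) : List Char :=
  string.foldl (fun swapped char =>
    if char = '0' then swapped ++ ['1']
    else if char = '1' then swapped ++ ['0']
    else swapped ++ [char]) []

-- A's `while decimal > 0:` loop; state (decimal, binary)
def pyBinLoopA (d : Int) (binary : List Char) : List Char :=
  if _h : 0 < d then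
    pyBinLoopA (PySem.Int.floordiv d 2) (PySem.Int.toChars (PySem.Int.mod d 2) ++ binary)
  else binary
termination_by d.toNat
decreasing_by
  have h2 : PySem.Int.floordiv d 2 = d / 2 := PySem.Int.floordiv_eq_ediv_of_pos (by omega)
  rw [h2]; omega

def decimal_to_binary_reversed (decimal : Int) : String :=
  let binary : List Char := if decimal = 0 then ['0'] else []
  let neg : Bool := if decimal ≥ 0 then false else true
  let binary := pyBinLoopA (decimal.natAbs : Int) binary
  let binary := List.replicate (8 - binary.length) '0' ++ binary
  let binary := if neg then '1' :: (swap_zeros_ones binary).drop 1 else binary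
  String.mk binary

-- ===== PORT B =====
-- port of format(n, 'b'): binary digits of n, most significant first ('0' for n = 0)
def fmtBinBits (n : Nat) : List Char :=
  if n = 0 then [] else fmtBinBits (n / 2) ++ [if n % 2 = 1 then '1' else '0']

def fmtBin (n : Nat) : List Char := if n = 0 then ['0'] else fmtBinBits n

def decimal_to_binary_reversed_alt (decimal : Int) : String :=
  let b := fmtBin decimal.natAbs
  let b := List.replicate (8 - b.length) '0' ++ b   -- rjust(8, '0')
  String.mk (if decimal < 0 then '1' :: (b.map (fun c => if c = '0' then '1' else '0')).drop 1 else b)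

-- ===== PRECONDITION & SPEC =====
def Spec_decimal_to_binary_reversed (decimal : Int) (out : String) : Prop := out = decimal_to_binary_reversed_alt decimal
instance (decimal : Int) (out : String) : Decidable (Spec_decimal_to_binary_reversed decimal out) := by unfold Spec_decimal_to_binary_reversed; infer_instance

-- ===== CLAIM (what is proved, stated in full; the proofs are below) =====
def Claim_equal_decimal_to_binary_reversed : Prop := ∀ (decimal : Int), Dom_decimal_to_binary_reversed decimal → Spec_decimal_to_binary_reversed decimal (decimal_to_binary_reversed decimal)

-- ===== LEMMAS AND PROOFS =====

-- A's while loop computes exactly B's format(·,'b') digits, prepended to the accumulator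
theorem pyBinLoopA_eq (n : Nat) : ∀ acc : List Char, pyBinLoopA (n : Int) acc = fmtBinBits n ++ acc := by
  induction n using Nat.strong_induction_on with
  | _ n ih =>
    intro acc
    by_cases h0 : n = 0
    · subst h0; rw [pyBinLoopA, fmtBinBits]; simp
    · rw [pyBinLoopA]
      have hpos : (0 : Int) < (n : Int) := by omega
      rw [dif_pos hpos]
      have hd : PySem.Int.floordiv (n : Int) 2 = ((n / 2 : Nat) : Int) := by
        exact_mod_cast PySem.Int.floordiv_natCast n 2
      have hm : PySem.Int.mod (n : Int) 2 = ((n % 2 : Nat) : Int) := by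
        exact_mod_cast PySem.Int.mod_natCast n 2
      rw [hd, hm, ih (n / 2) (by omega)]
      conv_rhs => rw [fmtBinBits, if_neg h0]
      have : PySem.Int.toChars ((n % 2 : Nat) : Int) = [if n % 2 = 1 then '1' else '0'] := by
        rcases Nat.mod_two_eq_zero_or_one n with h | h <;> rw [h] <;> decide
      rw [this]; simp

theorem fmtBinBits_binary (n : Nat) : ∀ c ∈ fmtBinBits n, c = '0' ∨ c = '1' := by
  induction n using Nat.strong_induction_on with
  | _ n ih =>
    intro c hc
    rw [fmtBinBits] at hc
    by_cases h0 : n = 0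
    · simp [h0] at hc
    · rw [if_neg h0] at hc
      rcases List.mem_append.1 hc with h | h
      · exact ih (n / 2) (by omega) c h
      · simp at h; subst h; split <;> simp

-- A's swap_zeros_ones fold is a map
theorem swap_zeros_ones_eq_map (s : List Char) :
    swap_zeros_ones s = s.map (fun c => if c = '0' then '1' else if c = '1' then '0' else c) := by
  unfold swap_zeros_ones
  rw [PySem.List.foldl_congr_mem s _
        (fun acc c => acc ++ [if c = '0' then '1' else if c = '1' then '0' else c]) []
        (by intro acc x _; by_cases h1 : x = '0' <;> by_cases h2 : x = '1' <;> simp [h1, h2]),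
     PySem.List.foldl_append_singleton_eq_map]
  rfl

-- ===== VERDICT (by name: the statement is the Claim_ definition above) =====
theorem decimal_to_binary_reversed_spec : Claim_equal_decimal_to_binary_reversed := by
  intro decimal _
  simp only [Spec_decimal_to_binary_reversed, decimal_to_binary_reversed,
    decimal_to_binary_reversed_alt]
  -- the magnitude digit lists coincide
  have hcore : pyBinLoopA (decimal.natAbs : Int) (if decimal = 0 then ['0'] else []) =
      fmtBin decimal.natAbs := by
    by_cases h0 : decimal = 0
    · subst h0; rw [if_pos rfl]; rw [pyBinLoopA]; simp [fmtBin]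
    · rw [if_neg h0, pyBinLoopA_eq, fmtBin, if_neg (by simpa using h0)]; simp
  rw [hcore]
  set b := fmtBin decimal.natAbs with hb
  set p := List.replicate (8 - b.length) '0' ++ b with hp
  have hbin : ∀ c ∈ p, c = '0' ∨ c = '1' := by
    intro c hc
    rcases List.mem_append.1 hc with h | h
    · exact Or.inl (List.eq_of_mem_replicate h)
    · rw [hb, fmtBin] at h
      by_cases hz : decimal.natAbs = 0
      · rw [if_pos hz] at h; simp at h; exact Or.inl h
      · rw [if_neg hz] at h; exact fmtBinBits_binary _ c h
  have hneg : (if decimal ≥ 0 then false else true) = true ↔ decimal < 0 := by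
    split <;> simp <;> omega
  by_cases hlt : decimal < 0
  · rw [if_pos (hneg.2 hlt), if_pos hlt, swap_zeros_ones_eq_map]
    have hm : p.map (fun c => if c = '0' then '1' else if c = '1' then '0' else c) =
        p.map (fun c => if c = '0' then '1' else '0') :=
      List.map_congr_left (by intro c hc; rcases hbin c hc with h | h <;> simp [h])
    rw [hm]
  · rw [if_neg (by simp [hlt]), if_neg hlt]
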